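-- pv_equiv track=rewrite | github.com/yeredarana3511-lab/sgbd-biblioteca | utils/formato_texto.py | normalizar_titulo
-- ===== SOURCE A (Python) =====
-- def normalizar_titulo(titulo: str) -> str:
--     """
--     Normaliza el título de un libro eliminando caracteres no válidos,
--     espacios extra y capitalizando cada palabra.
--     """
--     caracteres_validos = []
--     for char in titulo:
--         if char.isalnum() or char.isspace() or char == ',':
--             caracteres_validos.append(char)
--
--     titulo_filtrado = "".join(caracteres_validos)
--
--     palabras = titulo_filtrado.split()
--
--     palabras_formateadas = [palabra.capitalize() for palabra in palabras]
--
--     titulo_final = " ".join(palabras_formateadas)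
--
--     return titulo_final
-- ===== SOURCE B (Python) =====
-- def normalizar_titulo(titulo: str) -> str:
--     # Single pass: fuse filter, split and capitalize into one traversal.
--     resultados = []
--     buffer = []
--     for char in titulo:
--         if char.isspace():
--             if buffer:
--                 resultados.append("".join(buffer).capitalize())
--                 buffer = []
--         elif char.isalnum() or char == ',':
--             buffer.append(char)
--     if buffer:
--         resultados.append("".join(buffer).capitalize())
--     return " ".join(resultados)
-- ===== Notes on version B (the rewrite author's own statement) =====
-- stated objective: alternative
-- what changed: B replaces A's four-stage pipeline (filter loop, join, split, capitalize-map, join) by a single pass over the string that maintains a current-word buffer and flushes the capitalized word at each whitespace run, building no intermediate filtered string.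
import Mathlib
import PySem

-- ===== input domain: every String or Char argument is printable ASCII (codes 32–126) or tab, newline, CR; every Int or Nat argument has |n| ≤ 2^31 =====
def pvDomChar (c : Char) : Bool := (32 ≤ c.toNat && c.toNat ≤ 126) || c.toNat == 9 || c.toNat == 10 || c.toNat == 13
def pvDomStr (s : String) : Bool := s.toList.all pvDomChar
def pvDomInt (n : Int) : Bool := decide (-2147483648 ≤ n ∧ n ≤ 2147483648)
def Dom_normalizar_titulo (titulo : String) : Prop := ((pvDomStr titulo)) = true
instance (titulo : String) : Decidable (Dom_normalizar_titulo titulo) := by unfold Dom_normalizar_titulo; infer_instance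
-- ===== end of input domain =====

-- B fuses A's filter/split/capitalize/join pipeline into one buffered pass over the string (alternative decomposition, same cost).


-- Python str.capitalize(): first char uppercased, rest lowercased (exact on ASCII).
def pyCapitalizeChars : List Char → List Char
  | [] => []
  | c :: rest => PySem.Chars.upperChar c :: rest.map PySem.Chars.lowerChar

def pyCapitalizeStr (s : String) : String := String.ofList (pyCapitalizeChars s.toList)

-- ===== PORT A =====
def normalizar_titulo (titulo : String) : String :=
  let caracteres_validos :=
    titulo.toList.foldl
      (fun acc c =>
        if PySem.Chars.isalnum c || PySem.Chars.isspace c || c == ',' then acc ++ [c] else acc) []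
  let titulo_filtrado := String.ofList caracteres_validos
  let palabras := PySem.Str.split₀ titulo_filtrado
  let palabras_formateadas := palabras.map pyCapitalizeStr
  PySem.Str.join " " palabras_formateadas

-- ===== PORT B =====
-- the single-pass loop of Source B: buffer = current word (in order), resultados = finished words
def pvGoB : List Char → List Char → List (List Char) → List (List Char)
  | [], buffer, resultados =>
      if buffer.isEmpty then resultados else resultados ++ [pyCapitalizeChars buffer]
  | c :: rest, buffer, resultados =>
      if PySem.Chars.isspace c then
        if buffer.isEmpty then pvGoB rest [] resultados
        else pvGoB rest [] (resultados ++ [pyCapitalizeChars buffer])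
      else if PySem.Chars.isalnum c || c == ',' then pvGoB rest (buffer ++ [c]) resultados
      else pvGoB rest buffer resultados

def normalizar_titulo_alt (titulo : String) : String :=
  String.ofList (PySem.Chars.join [' '] (pvGoB titulo.toList [] []))

-- ===== PRECONDITION & SPEC =====
def Spec_normalizar_titulo (titulo : String) (out : String) : Prop := out = normalizar_titulo_alt titulo
instance (titulo : String) (out : String) : Decidable (Spec_normalizar_titulo titulo out) := by unfold Spec_normalizar_titulo; infer_instance

-- ===== CLAIM (what is proved, stated in full; the proofs are below) =====
def Claim_equal_normalizar_titulo : Prop := ∀ (titulo : String), Dom_normalizar_titulo titulo → Spec_normalizar_titulo titulo (normalizar_titulo titulo)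

-- ===== LEMMAS AND PROOFS =====

def pvQ (c : Char) : Bool := PySem.Chars.isalnum c || PySem.Chars.isspace c || c == ','

theorem pv_go_acc (cs : List Char) : ∀ cur acc,
    PySem.Chars.split₀.go cs cur acc = acc.reverse ++ PySem.Chars.split₀.go cs cur [] := by
  induction cs with
  | nil =>
    intro cur acc
    simp [PySem.Chars.split₀.go]
    split <;> simp
  | cons c rest ih =>
    intro cur acc
    simp only [PySem.Chars.split₀.go]
    split
    · split
      · exact ih [] acc
      · rw [ih [] (cur.reverse :: acc), ih [] [cur.reverse]]
        simp
    · exact ih (c :: cur) acc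

theorem pv_goB_spec (cs : List Char) : ∀ buf res,
    pvGoB cs buf res =
      res ++ (PySem.Chars.split₀.go (cs.filter pvQ) buf.reverse []).map pyCapitalizeChars := by
  induction cs with
  | nil =>
    intro buf res
    simp only [pvGoB, List.filter_nil, PySem.Chars.split₀.go]
    by_cases hb : buf.isEmpty
    · simp [List.isEmpty_iff.mp hb]
    · have : buf.reverse.isEmpty = false := by
        simp [List.isEmpty_iff] at hb ⊢; exact hb
      simp [hb, this]
  | cons c rest ih =>
    intro buf res
    by_cases hs : PySem.Chars.isspace c
    · have hq : pvQ c = true := by simp [pvQ, hs]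
      by_cases hb : buf.isEmpty
      · simp only [pvGoB, hs, if_true, hb, List.filter_cons, hq, PySem.Chars.split₀.go]
        have hbr : buf.reverse.isEmpty = true := by
          simp [List.isEmpty_iff] at hb ⊢; exact hb
        simp only [hbr, if_true]
        exact ih [] res
      · have hbr : buf.reverse.isEmpty = false := by
          simp [List.isEmpty_iff] at hb ⊢; exact hb
        simp only [pvGoB, hs, if_true, hb, List.filter_cons, hq,
          PySem.Chars.split₀.go, hbr]
        rw [ih [] (res ++ [pyCapitalizeChars buf]),
          pv_go_acc (rest.filter pvQ) [] [buf.reverse.reverse]]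
        simp
    · by_cases ha : PySem.Chars.isalnum c || c == ','
      · have hq : pvQ c = true := by
          simp only [pvQ]
          rcases Bool.or_eq_true_iff.mp ha with h | h <;> simp [h]
        simp only [pvGoB, hs, ha, if_true, List.filter_cons, hq,
          PySem.Chars.split₀.go]
        rw [ih (buf ++ [c]) res]
        simp
      · have hq : pvQ c = false := by
          simp only [pvQ]
          simp only [Bool.or_eq_true_iff] at ha ⊢
          push Not at ha
          simp [ha.1, ha.2, hs]
        simp only [pvGoB, hs, ha, List.filter_cons, hq]
        exact ih buf res

-- ===== VERDICT (by name: the statement is the Claim_ definition above) =====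
theorem normalizar_titulo_spec : Claim_equal_normalizar_titulo := by
  intro t _
  unfold Spec_normalizar_titulo normalizar_titulo normalizar_titulo_alt
  have hfold : t.toList.foldl
      (fun acc c =>
        if PySem.Chars.isalnum c || PySem.Chars.isspace c || c == ',' then acc ++ [c] else acc) []
      = t.toList.filter pvQ := by
    simpa [pvQ] using PySem.List.foldl_append_if pvQ id t.toList []
  simp only [hfold]
  rw [pv_goB_spec t.toList [] []]
  simp [PySem.Str.split₀, PySem.Str.join, PySem.Chars.split₀, List.map_map]
  have hcap : (String.toList ∘ pyCapitalizeStr ∘ String.ofList) = pyCapitalizeChars := by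
    funext w; simp [pyCapitalizeStr]
  rw [hcap]
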